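-- pv_equiv track=rewrite | github.com/MinChul-Son/for-Coding-Test | 12_11.py | solution
-- ===== SOURCE A (Python) =====
-- def solution(arr):
--     answer = 0
--     current_ball = 0
--
--     for i in arr:
--         current_ball += i
--         if current_ball > 0:
--             answer += 1
--     return answer
-- ===== SOURCE B (Python) =====
-- def solution(arr):
--     # Divide and conquer: the number of positive prefix sums of `seg` shifted
--     # by `base` splits at the midpoint, the right half shifted by sum(left).
--     def count(seg, base):
--         if not seg:
--             return 0
--         if len(seg) == 1:
--             return 1 if base + seg[0] > 0 else 0
--         mid = len(seg) // 2
--         left, right = seg[:mid], seg[mid:]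
--         return count(left, base) + count(right, base + sum(left))
--     return count(arr, 0)
-- ===== Notes on version B (the rewrite author's own statement) =====
-- stated objective: alternative
-- what changed: Replaces A's left-to-right loop with a running accumulator by a divide-and-conquer recursion: split the list at the midpoint, count positive prefix sums in each half, shifting the right half's base by the left half's total sum.
import Mathlib
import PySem

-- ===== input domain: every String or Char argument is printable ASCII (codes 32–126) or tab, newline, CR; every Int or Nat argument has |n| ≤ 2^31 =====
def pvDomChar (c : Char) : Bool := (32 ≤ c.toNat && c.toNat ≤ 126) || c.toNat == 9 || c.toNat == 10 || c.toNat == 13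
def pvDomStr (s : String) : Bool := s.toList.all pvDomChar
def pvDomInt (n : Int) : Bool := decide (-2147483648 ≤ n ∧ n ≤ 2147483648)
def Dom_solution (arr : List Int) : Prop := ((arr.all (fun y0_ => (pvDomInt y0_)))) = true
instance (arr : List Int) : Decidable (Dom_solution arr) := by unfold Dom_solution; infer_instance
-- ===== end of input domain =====

-- B replaces A's left-to-right accumulator loop by a divide-and-conquer recursion over halves (alternative algorithm, similar cost).


-- ===== PORT A =====
def solution (arr : List Int) : Int :=
  (arr.foldl (fun (st : Int × Int) i =>
      let current := st.2 + i
      (if current > 0 then st.1 + 1 else st.1, current)) (0, 0)).1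

-- ===== PORT B =====
-- Source B's inner `count(seg, base)`: divide and conquer at the midpoint.
def countDC (seg : List Int) (base : Int) : Int :=
  if seg = [] then 0
  else if seg.length = 1 then (if base + PySem.List.pyGetD seg 0 0 > 0 then 1 else 0)
  else
    let mid := seg.length / 2
    let left := PySem.List.slice seg none (some (mid : Int))
    let right := PySem.List.slice seg (some (mid : Int)) none
    countDC left base + countDC right (base + left.sum)
termination_by seg.length
decreasing_by
  · rw [PySem.List.slice_to_natCast]
    rename_i h0 h1
    have : seg.length ≠ 0 := by simpa using h0
    simp only [List.length_take]
    omega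
  · rw [PySem.List.slice_from_natCast]
    rename_i h0 h1
    have : seg.length ≠ 0 := by simpa using h0
    simp only [List.length_drop]
    omega

def solution_alt (arr : List Int) : Int := countDC arr 0

-- ===== PRECONDITION & SPEC =====
def Spec_solution (arr : List Int) (out : Int) : Prop := out = solution_alt arr
instance (arr : List Int) (out : Int) : Decidable (Spec_solution arr out) := by unfold Spec_solution; infer_instance

-- ===== CLAIM (what is proved, stated in full; the proofs are below) =====
def Claim_equal_solution : Prop := ∀ (arr : List Int), Dom_solution arr → Spec_solution arr (solution arr)

-- ===== LEMMAS AND PROOFS =====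

-- A's fold, started from (a, c), returns a plus the number of prefix lengths k with c + sum(take k) > 0.
theorem fold_eq_countP (xs : List Int) : ∀ (a c : Int),
    (xs.foldl (fun (st : Int × Int) i =>
      let current := st.2 + i
      (if current > 0 then st.1 + 1 else st.1, current)) (a, c)).1
    = a + ((List.range xs.length).countP
        (fun j => decide (c + (xs.take (j + 1)).sum > 0)) : Int) := by
  induction xs with
  | nil => intro a c; simp
  | cons x xs ih =>
    intro a c
    simp only [List.foldl, List.length_cons, List.range_succ_eq_map, List.countP_cons]
    rw [ih]
    rw [List.countP_map]
    by_cases h : c + x > 0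
    · simp [h, Function.comp_def, add_assoc]; ring
    · simp [h, Function.comp_def, add_assoc]

-- B's divide-and-conquer equals the same count of positive shifted prefix sums.
theorem countDC_eq_countP (n : Nat) : ∀ (seg : List Int), seg.length = n → ∀ (base : Int),
    countDC seg base
    = ((List.range seg.length).countP
        (fun j => decide (base + (seg.take (j + 1)).sum > 0)) : Int) := by
  induction n using Nat.strong_induction_on with
  | _ n ih =>
    intro seg hlen base
    rw [countDC]
    by_cases h0 : seg = []
    · subst h0; simp
    · by_cases h1 : seg.length = 1
      · obtain ⟨x, hx⟩ := List.length_eq_one_iff.mp h1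
        subst hx
        simp [h0, PySem.List.pyGetD, PySem.List.pyGet?, PySem.List.pyIdx?, List.range_succ]
      · have hne : seg.length ≠ 0 := by simpa using h0
        have h2 : 2 ≤ seg.length := by omega
        simp only [h0, h1, if_false]
        rw [PySem.List.slice_to_natCast, PySem.List.slice_from_natCast]
        set m := seg.length / 2 with hm
        have hm1 : 1 ≤ m := by omega
        have hmlt : m < seg.length := by omega
        have hlt : (seg.take m).length = m := by
          simp [List.length_take]; omega
        have hrt : (seg.drop m).length = seg.length - m := by
          simp [List.length_drop]
        rw [ih m (by omega) (seg.take m) hlt base,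
            ih (seg.length - m) (by omega) (seg.drop m) hrt (base + (seg.take m).sum)]
        rw [hlt, hrt]
        have hsplit : seg.length = m + (seg.length - m) := by omega
        rw [show List.range seg.length = List.range (m + (seg.length - m)) from by rw [← hsplit]]
        rw [List.range_add, List.countP_append, List.countP_map]
        push_cast
        congr 1
        · -- left part: prefixes of length ≤ m
          congr 1
          apply List.countP_congr
          intro j hj
          have hjm : j < m := by simpa using hj
          rw [List.take_take]
          have : min (j + 1) m = j + 1 := by omega
          rw [this]
        · -- right part: prefixes crossing the midpoint
          congr 1
          apply List.countP_congr
          intro i _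
          simp only [Function.comp_def]
          have h3 : List.take (m + i + 1) seg
              = List.take m seg ++ List.take (i + 1) (List.drop m seg) := by
            rw [show m + i + 1 = m + (i + 1) from rfl]
            exact List.take_add (i := m) (j := i + 1)
          rw [h3, List.sum_append, add_assoc]

-- ===== VERDICT (by name: the statement is the Claim_ definition above) =====
theorem solution_spec : Claim_equal_solution := by
  intro arr _
  unfold Spec_solution solution solution_alt
  rw [fold_eq_countP arr 0 0, countDC_eq_countP arr.length arr rfl 0]
  simp
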